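-- pv_equiv track=rewrite | github.com/MarcusSalzer/html_highlight | highlighting_functions.py | bracket_levels
-- ===== SOURCE A (Python) =====
-- def bracket_levels(tags):
--     """Rename bracket tags from brac_op/cl to brac_num.
--
--     ## Returns
--     - tags (list[str]): modified tags
--     - brac_level (list[int]): bracket depth for all tokens."""
--     brac_level = []
--     current_level = 0
--     for i in range(len(tags)):
--         if tags[i] == "brac_op":
--             brac_level.append(current_level)
--             current_level += 1
--             tags[i] = f"brac{current_level}"
--         elif tags[i] == "brac_cl":
--             tags[i] = f"brac{current_level}"
--             current_level -= 1
--             brac_level.append(current_level)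
--         else:
--             brac_level.append(current_level)
--
--     return tags, brac_level
-- ===== SOURCE B (Python) =====
-- def bracket_levels(tags):
--     """Prefix-sum version: depths come from cumulative sums of +1/-1 deltas;
--     brac_level[i] = min of adjacent prefix sums, a bracket's new name uses the max."""
--     deltas = [1 if t == "brac_op" else -1 if t == "brac_cl" else 0 for t in tags]
--     prefix = [0]
--     for d in deltas:
--         prefix.append(prefix[-1] + d)
--     pairs = list(zip(prefix, prefix[1:]))
--     brac_level = [min(a, b) for a, b in pairs]
--     tags[:] = [
--         "brac" + str(max(a, b)) if t in ("brac_op", "brac_cl") else t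
--         for t, (a, b) in zip(tags, pairs)
--     ]
--     return tags, brac_level
-- ===== Notes on version B (the rewrite author's own statement) =====
-- stated objective: alternative
-- what changed: B replaces A's stateful renaming loop with a prefix-sum formulation: it maps tags to +1/-1/0 deltas, builds the cumulative-sum list, and reads each token's depth as the min of adjacent prefix sums and each bracket's new name from their max.
import Mathlib
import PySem

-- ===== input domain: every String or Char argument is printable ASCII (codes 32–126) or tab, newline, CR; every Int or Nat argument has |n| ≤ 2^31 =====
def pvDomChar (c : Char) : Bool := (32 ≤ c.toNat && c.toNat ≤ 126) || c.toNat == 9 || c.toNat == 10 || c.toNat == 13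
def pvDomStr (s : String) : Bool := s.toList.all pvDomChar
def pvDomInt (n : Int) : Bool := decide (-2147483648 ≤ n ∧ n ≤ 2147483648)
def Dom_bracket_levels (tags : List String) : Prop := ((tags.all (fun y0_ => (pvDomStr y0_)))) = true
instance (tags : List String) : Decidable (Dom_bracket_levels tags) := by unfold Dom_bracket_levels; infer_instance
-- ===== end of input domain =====

-- B recomputes A's result via prefix sums of bracket deltas instead of A's stateful renaming loop;
-- both Pythons mutate `tags` in place identically, the equivalence proved is about the returned pair.


-- f"brac{n}"
def bracName (n : Int) : String := "brac" ++ PySem.Int.toStr n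

-- ===== PORT A =====
-- A's single pass over the tokens, carrying current_level; each step renames the
-- current element (only position i is read/written at step i) and appends the depth.
def bracketGo (lvl : Int) : List String → List String × List Int
  | [] => ([], [])
  | t :: rest =>
    if t = "brac_op" then
      let r := bracketGo (lvl + 1) rest
      (bracName (lvl + 1) :: r.1, lvl :: r.2)
    else if t = "brac_cl" then
      let r := bracketGo (lvl - 1) rest
      (bracName lvl :: r.1, (lvl - 1) :: r.2)
    else
      let r := bracketGo lvl rest
      (t :: r.1, lvl :: r.2)

def bracket_levels (tags : List String) : List String × List Int := bracketGo 0 tags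

-- ===== PORT B =====
-- the +1/-1/0 delta of one tag
def deltaOf (t : String) : Int :=
  if t = "brac_op" then 1 else if t = "brac_cl" then -1 else 0

-- the cumulative-sum list starting at s (Python's `prefix` list, built from `deltas`)
def prefixScan (s : Int) : List Int → List Int
  | [] => [s]
  | d :: ds => s :: prefixScan (s + d) ds

def bracket_levels_alt (tags : List String) : List String × List Int :=
  let pref := prefixScan 0 (tags.map deltaOf)
  let pairs := pref.zip pref.tail
  let brac_level := pairs.map (fun p => min p.1 p.2)
  let newTags := (tags.zip pairs).map (fun q =>
    if q.1 = "brac_op" ∨ q.1 = "brac_cl" then bracName (max q.2.1 q.2.2) else q.1)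
  (newTags, brac_level)

-- ===== PRECONDITION & SPEC =====
def Spec_bracket_levels (tags : List String) (out : List String × List Int) : Prop := out = bracket_levels_alt tags
instance (tags : List String) (out : List String × List Int) : Decidable (Spec_bracket_levels tags out) := by unfold Spec_bracket_levels; infer_instance

-- ===== CLAIM (what is proved, stated in full; the proofs are below) =====
def Claim_equal_bracket_levels : Prop := ∀ (tags : List String), Dom_bracket_levels tags → Spec_bracket_levels tags (bracket_levels tags)

-- ===== LEMMAS AND PROOFS =====

-- proof helper: the list of adjacent pairs of the prefix-sum list, directly recursively
def pairsOf (s : Int) : List Int → List (Int × Int)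
  | [] => []
  | d :: ds => (s, s + d) :: pairsOf (s + d) ds

-- a prefix-sum list is its start value consed on its own tail
lemma prefixScan_eq_cons (ds : List Int) (s : Int) :
    prefixScan s ds = s :: (prefixScan s ds).tail := by
  cases ds <;> simp [prefixScan]

-- the zip of the prefix list with its tail is pairsOf
lemma zip_tail_eq (ds : List Int) : ∀ (s : Int),
    (prefixScan s ds).zip (prefixScan s ds).tail = pairsOf s ds := by
  induction ds with
  | nil => intro s; simp [prefixScan, pairsOf]
  | cons d ds ih =>
    intro s
    show (s :: prefixScan (s + d) ds).zip (prefixScan (s + d) ds) = _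
    rw [prefixScan_eq_cons ds (s + d), List.zip_cons_cons, ← prefixScan_eq_cons, ih, pairsOf]

-- main equivalence, generalised over the starting level
lemma alt_eq_go (tags : List String) : ∀ (lvl : Int),
    ((tags.zip (pairsOf lvl (tags.map deltaOf))).map (fun q =>
        if q.1 = "brac_op" ∨ q.1 = "brac_cl" then bracName (max q.2.1 q.2.2) else q.1),
      (pairsOf lvl (tags.map deltaOf)).map (fun p => min p.1 p.2)) = bracketGo lvl tags := by
  induction tags with
  | nil => intro lvl; simp [pairsOf, bracketGo]
  | cons t rest ih =>
    intro lvl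
    simp only [List.map_cons, pairsOf, List.zip_cons_cons, bracketGo]
    by_cases h1 : t = "brac_op"
    · rw [if_pos h1, if_pos (Or.inl h1)]
      have hd : deltaOf t = 1 := by simp [deltaOf, h1]
      rw [hd, ← ih (lvl + 1)]
      refine congrArg₂ _ (congrArg₂ _ ?_ rfl) (congrArg₂ _ ?_ rfl)
      · exact congrArg bracName (by omega)
      · omega
    · by_cases h2 : t = "brac_cl"
      · rw [if_neg h1, if_pos h2, if_pos (Or.inr h2)]
        have hd : deltaOf t = -1 := by simp [deltaOf, h2]
        have harg : lvl + (-1 : Int) = lvl - 1 := by omega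
        rw [hd, harg, ← ih (lvl - 1)]
        refine congrArg₂ _ (congrArg₂ _ ?_ rfl) (congrArg₂ _ ?_ rfl)
        · exact congrArg bracName (by omega)
        · omega
      · rw [if_neg h1, if_neg h2, if_neg (by simp [h1, h2])]
        have hd : deltaOf t = 0 := by simp [deltaOf, h1, h2]
        have harg : lvl + (0 : Int) = lvl := by omega
        rw [hd, harg, ← ih lvl]
        exact congrArg₂ _ rfl (congrArg₂ _ (by omega) rfl)

-- ===== VERDICT (by name: the statement is the Claim_ definition above) =====
theorem bracket_levels_spec : Claim_equal_bracket_levels := by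
  intro tags _
  show bracket_levels tags = bracket_levels_alt tags
  unfold bracket_levels bracket_levels_alt
  simp only [zip_tail_eq]
  exact (alt_eq_go tags 0).symm
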